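-- pv_equiv track=rewrite | github.com/UDASE-CHiME2023/reverberant-LibriCHiME-5-metadata | utils.py | get_segments_start_end
-- ===== SOURCE A (Python) =====
-- def get_segments_start_end(segmentation):
--     """
--     Given a list of binary values, returns the lists of starting and ending
--     indices of the segments with elements equal to one.
--     """
--     starts = []
--     ends = []
--
--     start_bool = True
--     end_bool = False
--
--     for i, val in enumerate(segmentation):
--         if start_bool and val==1:
--             starts.append(i)
--             start_bool = False
--             end_bool = True
--         elif end_bool and val==0:
--             ends.append(i)
--             end_bool = False
--             start_bool = True
--
--     if len(ends) < len(starts):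
--         ends.append(len(segmentation))
--
--     assert len(ends) == len(starts)
--
--     for (start, end) in zip(starts, ends):
--         assert all(x==1 for x in segmentation[start:end])
--
--     return starts, ends
-- ===== SOURCE B (Python) =====
-- def get_segments_start_end(segmentation):
--     """
--     Given a list of binary values, returns the lists of starting and ending
--     indices of the segments with elements equal to one.
--     """
--     starts, ends = [], []
--     n = len(segmentation)
--     i = 0
--     while i < n:
--         if segmentation[i] == 1:
--             starts.append(i)
--             while i < n and segmentation[i] == 1:
--                 i += 1
--             ends.append(i)
--         else:
--             i += 1
--     return starts, ends
-- ===== Notes on version B (the rewrite author's own statement) =====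
-- stated objective: simpler
-- what changed: Replaces A's two-boolean state-machine flags plus trailing length fix-up and assertion pass by a plain index scan that consumes each run of ones with an inner while loop, appending start and end immediately; Pre_ excludes exactly the inputs on which A raises AssertionError (a non-binary value occurring inside a reported segment).
import Mathlib
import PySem

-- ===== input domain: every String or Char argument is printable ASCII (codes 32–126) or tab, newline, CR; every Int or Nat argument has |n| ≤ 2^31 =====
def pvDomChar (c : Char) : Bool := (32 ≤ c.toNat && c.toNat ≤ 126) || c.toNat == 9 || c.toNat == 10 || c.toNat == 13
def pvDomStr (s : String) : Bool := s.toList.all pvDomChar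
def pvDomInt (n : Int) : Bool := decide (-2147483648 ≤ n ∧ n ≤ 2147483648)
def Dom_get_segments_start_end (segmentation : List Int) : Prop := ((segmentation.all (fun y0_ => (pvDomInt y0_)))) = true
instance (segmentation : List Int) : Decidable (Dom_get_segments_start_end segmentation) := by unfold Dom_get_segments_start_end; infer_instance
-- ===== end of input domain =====

-- B replaces A's two-boolean state machine (with trailing fix-up and assertion pass)
-- by a plain index scan consuming each run of ones with an inner loop; objective: simpler.

-- ===== PORT A =====
-- the 'for i, val in enumerate(segmentation)' loop with state (starts, ends, start_bool, end_bool)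
def aLoop (l : List Int) (i : Int) (starts ends : List Int) (start_bool end_bool : Bool) :
    List Int × List Int × Bool × Bool :=
  match l with
  | [] => (starts, ends, start_bool, end_bool)
  | v :: t =>
    if start_bool && (v == 1) then aLoop t (i + 1) (starts ++ [i]) ends false true
    else if end_bool && (v == 0) then aLoop t (i + 1) starts (ends ++ [i]) true false
    else aLoop t (i + 1) starts ends start_bool end_bool

-- the two assert statements are omitted: Pre_ admits exactly the inputs where they pass
def get_segments_start_end (segmentation : List Int) : List Int × List Int :=
  let r := aLoop segmentation 0 [] [] true false
  let starts := r.1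
  let ends := if r.2.1.length < r.1.length then r.2.1 ++ [(segmentation.length : Int)] else r.2.1
  (starts, ends)

-- ===== PORT B =====
-- Source B's two nested while loops: bScan is the outer 'while i < n' loop (not inside a run),
-- bRun is the inner 'while i < n and segmentation[i] == 1' loop plus the 'ends.append(i)'
-- at its exit, after which control returns to the outer loop.
mutual
def bScan : List Int → Int → List Int × List Int
  | [], _ => ([], [])
  | v :: t, i =>
    if v == 1 then let r := bRun t (i + 1); (i :: r.1, r.2)
    else bScan t (i + 1)
def bRun : List Int → Int → List Int × List Int
  | [], i => ([], [i])
  | v :: t, i =>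
    if v == 1 then bRun t (i + 1)
    else let r := bScan t (i + 1); (r.1, i :: r.2)
end

def get_segments_start_end_alt (segmentation : List Int) : List Int × List Int :=
  bScan segmentation 0

-- ===== PRECONDITION & SPEC =====
-- Pre_ excludes exactly the inputs on which A's assertion fails (AssertionError):
-- a non-binary value occurring after a 1 with no 0 in between, i.e. inside a reported segment.
def Pre_get_segments_start_end (segmentation : List Int) : Prop :=
  ¬ ∃ i : Fin segmentation.length, ∃ k : Fin segmentation.length,
      (i : Nat) < k ∧ segmentation.get i = 1 ∧
      segmentation.get k ≠ 0 ∧ segmentation.get k ≠ 1 ∧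
      ∀ j : Fin segmentation.length, (i : Nat) < j → (j : Nat) < k → segmentation.get j ≠ 0
instance (segmentation : List Int) : Decidable (Pre_get_segments_start_end segmentation) := by
  unfold Pre_get_segments_start_end; infer_instance

def pvWitness_get_segments_start_end : List Int := [0, 1, 1, 0, 1]

def Spec_get_segments_start_end (segmentation : List Int) (out : List Int × List Int) : Prop := out = get_segments_start_end_alt segmentation
instance (segmentation : List Int) (out : List Int × List Int) : Decidable (Spec_get_segments_start_end segmentation out) := by unfold Spec_get_segments_start_end; infer_instance

-- ===== CLAIM (what is proved, stated in full; the proofs are below) =====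
def Claim_equal_get_segments_start_end : Prop := ∀ (segmentation : List Int), Dom_get_segments_start_end segmentation → Pre_get_segments_start_end segmentation → Spec_get_segments_start_end segmentation (get_segments_start_end segmentation)

-- ===== LEMMAS AND PROOFS =====

-- assertion-pass condition as a state machine over the suffix; state = "inside a segment"
def okB : Bool → List Int → Bool
  | _, [] => true
  | b, v :: t => if v = 1 then okB true t else if v = 0 then okB false t else !b && okB false t

-- Nat-indexed form of the bad pattern, for the suffix starting in state b
def BadN (b : Bool) (l : List Int) : Prop :=
  ∃ k, k < l.length ∧ l.getD k 0 ≠ 0 ∧ l.getD k 0 ≠ 1 ∧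
    ((b = true ∧ ∀ j, j < k → l.getD j 0 ≠ 0) ∨
     (∃ i, i < k ∧ l.getD i 0 = 1 ∧ ∀ j, i < j → j < k → l.getD j 0 ≠ 0))

theorem badN_of_okB_false (l : List Int) (b : Bool) (h : okB b l = false) : BadN b l := by
  induction l generalizing b with
  | nil => simp [okB] at h
  | cons v t ih =>
    by_cases h1 : v = 1
    · subst h1
      simp only [okB] at h
      norm_num at h
      obtain ⟨k, hk, hk0, hk1, hd⟩ := ih true h
      refine ⟨k + 1, by simpa using hk, by simpa using hk0, by simpa using hk1, Or.inr ?_⟩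
      rcases hd with ⟨_, hall⟩ | ⟨i, hik, hi1, hall⟩
      · exact ⟨0, by omega, by simp, fun j hj hjk => by
          obtain ⟨j', rfl⟩ := Nat.exists_eq_add_of_lt hj
          simpa [Nat.add_comm] using hall j' (by omega)⟩
      · exact ⟨i + 1, by omega, by simpa using hi1, fun j hj hjk => by
          obtain ⟨j', rfl⟩ := Nat.exists_eq_add_of_lt (show 0 < j by omega)
          simpa [Nat.add_comm] using hall j' (by omega) (by omega)⟩
    · have hrec : okB false t = false → BadN b (v :: t) := by
        intro hf
        obtain ⟨k, hk, hk0, hk1, hd⟩ := ih false hf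
        rcases hd with ⟨habs, _⟩ | ⟨i, hik, hi1, hall⟩
        · exact absurd habs (by simp)
        · exact ⟨k + 1, by simpa using hk, by simpa using hk0, by simpa using hk1,
            Or.inr ⟨i + 1, by omega, by simpa using hi1, fun j hj hjk => by
              obtain ⟨j', rfl⟩ := Nat.exists_eq_add_of_lt (show 0 < j by omega)
              simpa [Nat.add_comm] using hall j' (by omega) (by omega)⟩⟩
      by_cases h0 : v = 0
      · subst h0
        simp only [okB] at h
        norm_num at h
        exact hrec h
      · simp only [okB, if_neg h1, if_neg h0, Bool.and_eq_false_iff, Bool.not_eq_false'] at h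
        rcases h with hb | hf
        · exact ⟨0, by simp, by simpa using h0, by simpa using h1,
            Or.inl ⟨hb, fun j hj => by omega⟩⟩
        · exact hrec hf

theorem okB_of_pre (seg : List Int) (hpre : Pre_get_segments_start_end seg) :
    okB false seg = true := by
  by_contra h
  have hok : okB false seg = false := by
    cases hx : okB false seg
    · rfl
    · exact absurd hx h
  obtain ⟨k, hk, hk0, hk1, hd⟩ := badN_of_okB_false seg false hok
  rcases hd with ⟨habs, _⟩ | ⟨i, hik, hi1, hall⟩
  · exact absurd habs (by simp)
  · rw [List.getD_eq_getElem _ _ hk] at hk0 hk1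
    rw [List.getD_eq_getElem _ _ (by omega)] at hi1
    refine hpre ⟨⟨i, by omega⟩, ⟨k, hk⟩, hik, by simpa using hi1, by simpa using hk0,
      by simpa using hk1, fun j hj hjk => ?_⟩
    have := hall j hj hjk
    rw [List.getD_eq_getElem _ _ (by omega : (j : Nat) < seg.length)] at this
    simpa using this

-- the central correspondence: A's loop, from each of its two states, vs B's two loops
theorem main_ind (l : List Int) :
    (∀ (i : Int) (s e : List Int), okB false l = true →
      ∃ (eb : Bool) (E' : List Int),
        (bScan l i).2 = E' ++ (if eb then [i + (l.length : Int)] else []) ∧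
        aLoop l i s e true false = (s ++ (bScan l i).1, e ++ E', !eb, eb))
    ∧
    (∀ (i : Int) (s e : List Int), okB true l = true →
      ∃ (eb : Bool) (E' : List Int),
        (bRun l i).2 = E' ++ (if eb then [i + (l.length : Int)] else []) ∧
        aLoop l i s e false true = (s ++ (bRun l i).1, e ++ E', !eb, eb)) := by
  induction l with
  | nil =>
    constructor
    · intro i s e _
      exact ⟨false, [], by simp [bScan], by simp [aLoop, bScan]⟩
    · intro i s e _
      exact ⟨true, [], by simp [bRun], by simp [aLoop, bRun]⟩
  | cons v t ih =>
    have hlen : ∀ i : Int, i + ((v :: t).length : Int) = (i + 1) + (t.length : Int) := by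
      intro i; simp; ring
    constructor
    · intro i s e h
      by_cases h1 : v = 1
      · subst h1
        have ht : okB true t = true := by simpa [okB] using h
        obtain ⟨eb, E', hE, hA⟩ := ih.2 (i + 1) (s ++ [i]) e ht
        have hb : bScan ((1 : Int) :: t) i = (i :: (bRun t (i + 1)).1, (bRun t (i + 1)).2) := by
          rw [bScan]; simp
        have ha : aLoop ((1 : Int) :: t) i s e true false =
            aLoop t (i + 1) (s ++ [i]) e false true := by
          rw [aLoop]; simp
        refine ⟨eb, E', ?_, ?_⟩
        · rw [hb, hlen i]; exact hE
        · rw [ha, hA, hb]; simp [List.append_assoc]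
      · have ht : okB false t = true := by
          by_cases h0 : v = 0 <;> simpa [okB, h1, h0] using h
        obtain ⟨eb, E', hE, hA⟩ := ih.1 (i + 1) s e ht
        have hb : bScan (v :: t) i = bScan t (i + 1) := by
          rw [bScan]; simp [h1]
        have ha : aLoop (v :: t) i s e true false = aLoop t (i + 1) s e true false := by
          rw [aLoop]; simp [h1]
        refine ⟨eb, E', ?_, ?_⟩
        · rw [hb, hlen i]; exact hE
        · rw [ha, hA, hb]
    · intro i s e h
      by_cases h1 : v = 1
      · subst h1
        have ht : okB true t = true := by simpa [okB] using h
        obtain ⟨eb, E', hE, hA⟩ := ih.2 (i + 1) s e ht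
        have hb : bRun ((1 : Int) :: t) i = bRun t (i + 1) := by
          rw [bRun]; simp
        have ha : aLoop ((1 : Int) :: t) i s e false true =
            aLoop t (i + 1) s e false true := by
          rw [aLoop]; simp
        refine ⟨eb, E', ?_, ?_⟩
        · rw [hb, hlen i]; exact hE
        · rw [ha, hA, hb]
      · by_cases h0 : v = 0
        · subst h0
          have ht : okB false t = true := by simpa [okB] using h
          obtain ⟨eb, E', hE, hA⟩ := ih.1 (i + 1) s (e ++ [i]) ht
          have hb : bRun ((0 : Int) :: t) i = ((bScan t (i + 1)).1, i :: (bScan t (i + 1)).2) := by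
            rw [bRun]; simp
          have ha : aLoop ((0 : Int) :: t) i s e false true =
              aLoop t (i + 1) s (e ++ [i]) true false := by
            rw [aLoop]; simp
          refine ⟨eb, i :: E', ?_, ?_⟩
          · rw [hb, hlen i]
            simp only
            rw [List.cons_append]
            exact congrArg (i :: ·) hE
          · rw [ha, hA, hb]
            simp [List.append_assoc]
        · exfalso; simp [okB, h1, h0] at h

theorem scan_run_len (l : List Int) :
    (∀ i : Int, (bScan l i).1.length = (bScan l i).2.length) ∧
    (∀ i : Int, (bRun l i).1.length + 1 = (bRun l i).2.length) := by
  induction l with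
  | nil => exact ⟨fun i => by simp [bScan], fun i => by simp [bRun]⟩
  | cons v t ih =>
    constructor
    · intro i
      by_cases h1 : v = 1
      · subst h1
        rw [bScan]
        simpa using ih.2 (i + 1)
      · rw [bScan]; simp only [beq_iff_eq, if_neg h1]
        exact ih.1 (i + 1)
    · intro i
      by_cases h1 : v = 1
      · subst h1
        rw [bRun]
        simpa using ih.2 (i + 1)
      · rw [bRun]; simp only [beq_iff_eq, if_neg h1]
        simpa using ih.1 (i + 1)

theorem ab_eq (seg : List Int) (hpre : Pre_get_segments_start_end seg) :
    get_segments_start_end seg = get_segments_start_end_alt seg := by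
  have hok := okB_of_pre seg hpre
  obtain ⟨eb, E', hE, hA⟩ := (main_ind seg).1 0 [] [] hok
  have hlen := (scan_run_len seg).1 0
  unfold get_segments_start_end get_segments_start_end_alt
  simp only [hA, List.nil_append]
  cases eb with
  | false =>
    simp only [Bool.false_eq_true, if_false, List.append_nil] at hE
    have hnlt : ¬ E'.length < (bScan seg 0).1.length := by
      rw [hlen, ← hE]; exact lt_irrefl _
    simp only [hnlt, if_false]
    rw [← hE]
  | true =>
    simp only [if_pos trivial] at hE
    rw [zero_add] at hE
    have hlt : E'.length < (bScan seg 0).1.length := by rw [hlen, hE]; simp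
    simp only [hlt, if_true]
    rw [← hE]

-- ===== VERDICT (by name: the statements are the Claim_ definitions above) =====
theorem get_segments_start_end_spec : Claim_equal_get_segments_start_end := by
  intro seg _ hpre
  exact ab_eq seg hpre
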